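-- pv_equiv track=rewrite | github.com/Goodly/demowatch | Canonicalization/python_scripts/util.py | event_day
-- ===== SOURCE A (Python) =====
-- def event_day(text):
--     """
--     Gets the day of the week mentioned in a text.
--     str text: article to get date of
--     str return: index of day of event or None
--     """
--     d1 = ["", len(text)]
--     d2 = ["", len(text)]
--     for day in ["Sunday", "Monday", "Tuesday", "Wednesday", "Thursday", "Friday", "Saturday"]:
--         if day in text:
--             index = text.find(day)
--             if index < d2[1]:
--                 if index < d1[1]:
--                     d2 = d1
--                     d1 = [day, text.find(day)]
--                 else:
--                     d2 = [day, text.find(day)]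
--     return day_index(d2[0] or d1[0])
--
-- def day_index(day):
--     """
--     Gets the index of the day of the week: day_index("Sunday") = 0.
--     str day: name of day of the week
--     int return: index corresponding to day of the week
--     """
--     days = ["Sunday", "Monday", "Tuesday", "Wednesday", "Thursday", "Friday", "Saturday"]
--     if day in days:
--         return days.index(day)
-- ===== SOURCE B (Python) =====
-- def event_day(text):
--     """
--     Gets the day of the week mentioned in a text.
--     str text: article to get date of
--     str return: index of day of event or None
--     """
--     days = ["Sunday", "Monday", "Tuesday", "Wednesday", "Thursday", "Friday", "Saturday"]
--     found = sorted(
--         [(text.find(day), i) for i, day in enumerate(days) if day in text],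
--         key=lambda p: p[0],
--     )
--     if not found:
--         return None
--     return found[1][1] if len(found) > 1 else found[0][1]
-- ===== Notes on version B (the rewrite author's own statement) =====
-- stated objective: simpler
-- what changed: A tracks the two earliest weekday mentions with a hand-rolled pair of running minima updated by nested comparisons inside the loop; B instead collects (find-position, weekday-index) pairs for the occurring day names, stable-sorts them by position, and picks the second entry (or the only one, or None).
import Mathlib
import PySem

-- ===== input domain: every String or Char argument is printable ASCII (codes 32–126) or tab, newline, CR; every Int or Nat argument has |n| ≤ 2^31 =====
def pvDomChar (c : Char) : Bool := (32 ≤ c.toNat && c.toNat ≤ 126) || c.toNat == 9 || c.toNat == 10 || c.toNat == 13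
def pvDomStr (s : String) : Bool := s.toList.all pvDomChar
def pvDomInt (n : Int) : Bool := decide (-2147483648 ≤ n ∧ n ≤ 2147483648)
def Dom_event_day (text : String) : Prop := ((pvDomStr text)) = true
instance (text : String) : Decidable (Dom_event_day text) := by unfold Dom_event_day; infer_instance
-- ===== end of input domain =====

-- B replaces A's hand-rolled two-smallest tracking loop by "collect (find, index) of the
-- occurring days, stable-sort by position, take the second entry (or the only one)"; objective: simpler.

-- ===== PORT A =====
def pvDays : List String := ["Sunday", "Monday", "Tuesday", "Wednesday", "Thursday", "Friday", "Saturday"]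

def day_index (day : String) : Option Int :=
  if day ∈ pvDays then (PySem.List.index? pvDays day).map (fun n => (n : Int)) else none

def event_day (text : String) : Option Int :=
  let d1 : String × Int := ("", PySem.Str.len text)
  let d2 : String × Int := ("", PySem.Str.len text)
  let final := pvDays.foldl (fun (s : (String × Int) × (String × Int)) day =>
    if PySem.Str.isIn day text then
      let index := PySem.Str.find text day
      if index < s.2.2 then
        if index < s.1.2 then ((day, PySem.Str.find text day), s.1)
        else (s.1, (day, PySem.Str.find text day))
      else s
    else s) (d1, d2)
  day_index (if final.2.1 ≠ "" then final.2.1 else final.1.1)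

-- ===== PORT B =====
def event_day_alt (text : String) : Option Int :=
  let days : List String := ["Sunday", "Monday", "Tuesday", "Wednesday", "Thursday", "Friday", "Saturday"]
  let found := PySem.List.sorted
    ((PySem.List.enumerate days).filterMap (fun p =>
      if PySem.Str.isIn p.2 text then some (PySem.Str.find text p.2, p.1) else none))
    (fun p => p.1)
  match found with
  | [] => none
  | [p] => some p.2
  | _ :: q :: _ => some q.2

-- ===== PRECONDITION & SPEC =====
def Spec_event_day (text : String) (out : Option Int) : Prop := out = event_day_alt text
instance (text : String) (out : Option Int) : Decidable (Spec_event_day text out) := by unfold Spec_event_day; infer_instance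

-- ===== CLAIM (what is proved, stated in full; the proofs are below) =====
def Claim_equal_event_day : Prop := ∀ (text : String), Dom_event_day text → Spec_event_day text (event_day text)

-- ===== LEMMAS AND PROOFS =====

-- A's loop step, abstracted over the item's position key.
def pvKeyStep {α : Type} (key : α → Int) (s : α × α) (x : α) : α × α :=
  if key x < key s.2 then (if key x < key s.1 then (x, s.1) else (s.1, x)) else s

-- first two entries of a list, padded with the sentinel
def pvPad2 {α : Type} (sent : α) : List α → α × α
  | [] => (sent, sent)
  | [a] => (a, sent)
  | a :: b :: _ => (a, b)

def pvIns {α : Type} (key : α → Int) (x : α) (s : List α) : List α :=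
  PySem.List.insertBy (fun a b => decide (key a < key b)) x s

-- the occurring days of a text, with their first positions, in weekday order
def pvG (text day : String) : Option (String × Int) :=
  if PySem.Str.isIn day text then some (day, PySem.Str.find text day) else none

def pvOcc (text : String) : List (String × Int) := pvDays.filterMap (pvG text)

lemma pvIns_nil {α : Type} (key : α → Int) (x : α) : pvIns key x [] = [x] := by
  simp [pvIns, PySem.List.insertBy]

lemma pvIns_cons {α : Type} (key : α → Int) (x a : α) (t : List α) :
    pvIns key x (a :: t) = if key x < key a then x :: a :: t else a :: pvIns key x t := by
  simp [pvIns, PySem.List.insertBy]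

lemma pvIns_pairwise {α : Type} (key : α → Int) (x : α) (s : List α)
    (hs : s.Pairwise (fun a b => key a ≤ key b)) :
    (pvIns key x s).Pairwise (fun a b => key a ≤ key b) := by
  induction s with
  | nil => simp [pvIns_nil]
  | cons a t ih =>
    rw [pvIns_cons]
    rcases List.pairwise_cons.mp hs with ⟨ha, ht⟩
    split
    · refine List.pairwise_cons.mpr ⟨?_, hs⟩
      intro y hy
      rcases List.mem_cons.mp hy with rfl | hy
      · omega
      · exact le_trans (by omega) (ha y hy)
    · refine List.pairwise_cons.mpr ⟨?_, ih ht⟩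
      intro y hy
      rcases (PySem.List.mem_insertBy _ x y t).mp hy with rfl | hy
      · omega
      · exact ha y hy

lemma pvStep_insert {α : Type} (key : α → Int) (sent x : α) (s : List α)
    (hs : s.Pairwise (fun a b => key a ≤ key b)) (hx : key x < key sent) :
    pvKeyStep key (pvPad2 sent s) x = pvPad2 sent (pvIns key x s) := by
  match s with
  | [] =>
    rw [pvIns_nil]
    simp [pvPad2, pvKeyStep, hx]
  | [a] =>
    rw [pvIns_cons, pvIns_nil]
    by_cases h : key x < key a
    · simp [pvPad2, pvKeyStep, h, hx]
    · simp [pvPad2, pvKeyStep, h, hx]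
  | a :: b :: t =>
    have hab : key a ≤ key b := (List.pairwise_cons.mp hs).1 b (by simp)
    rw [pvIns_cons]
    by_cases ha : key x < key a
    · simp [pvPad2, pvKeyStep, ha, show key x < key b by omega]
    · rw [if_neg (by simpa using ha), pvIns_cons]
      by_cases hb : key x < key b
      · simp [pvPad2, pvKeyStep, ha, hb]
      · simp [pvPad2, pvKeyStep, hb]

lemma pvFold_pad2 {α : Type} (key : α → Int) (sent : α) (m : List α) :
    ∀ s : List α, s.Pairwise (fun a b => key a ≤ key b) → (∀ x ∈ m, key x < key sent) →
    m.foldl (pvKeyStep key) (pvPad2 sent s) = pvPad2 sent (m.foldl (fun acc x => pvIns key x acc) s) := by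
  induction m with
  | nil => intro s _ _; rfl
  | cons x t ih =>
    intro s hs hall
    have hx : key x < key sent := hall x (by simp)
    simp only [List.foldl_cons]
    rw [pvStep_insert key sent x s hs hx]
    exact ih (pvIns key x s) (pvIns_pairwise key x s hs) (fun y hy => hall y (by simp [hy]))

-- an occurring (nonempty) day name is found strictly before the end of the text
lemma pvFind_lt_len (s sub : String) (h : PySem.Str.isIn sub s = true) (hne : sub.toList ≠ []) :
    PySem.Str.find s sub < PySem.Str.len s := by
  have hnn : 0 ≤ PySem.Chars.find s.toList sub.toList :=
    (PySem.Chars.find_nonneg_iff _ _).mpr ((PySem.Chars.isIn_iff_infix _ _).mp (by simpa using h))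
  have hspec := (PySem.Chars.find_spec (s := s.toList) (sub := sub.toList) hnn).1
  have hlen := hspec.length_le
  have hdl : (s.toList.drop (PySem.Chars.find s.toList sub.toList).toNat).length
      = s.toList.length - (PySem.Chars.find s.toList sub.toList).toNat := by
    simp
  have hsub : 0 < sub.toList.length := List.length_pos_iff.mpr hne
  simp only [PySem.Str.find_eq, PySem.Str.len_eq]
  omega

lemma pvOcc_mem (text : String) (p : String × Int) (hp : p ∈ pvOcc text) :
    p.1 ∈ pvDays ∧ PySem.Str.isIn p.1 text = true ∧ p.2 = PySem.Str.find text p.1 := by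
  rcases List.mem_filterMap.mp hp with ⟨day, hday, hg⟩
  unfold pvG at hg
  split at hg
  · cases hg; exact ⟨hday, by assumption, rfl⟩
  · cases hg

lemma pvOcc_lt_len (text : String) (p : String × Int) (hp : p ∈ pvOcc text) :
    p.2 < PySem.Str.len text := by
  rcases pvOcc_mem text p hp with ⟨hmem, hin, hpos⟩
  have hne : p.1.toList ≠ [] := by
    have h7 : p.1 = "Sunday" ∨ p.1 = "Monday" ∨ p.1 = "Tuesday" ∨ p.1 = "Wednesday" ∨
        p.1 = "Thursday" ∨ p.1 = "Friday" ∨ p.1 = "Saturday" := by simpa [pvDays] using hmem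
    rcases h7 with h | h | h | h | h | h | h <;> rw [h] <;> decide
  rw [hpos]
  exact pvFind_lt_len text p.1 hin hne

-- A's loop is the two-min fold over the occurrence list
lemma pvA_fold (text : String) :
    pvDays.foldl (fun (s : (String × Int) × (String × Int)) day =>
      if PySem.Str.isIn day text then
        if PySem.Str.find text day < s.2.2 then
          if PySem.Str.find text day < s.1.2 then ((day, PySem.Str.find text day), s.1)
          else (s.1, (day, PySem.Str.find text day))
        else s
      else s) (("", PySem.Str.len text), ("", PySem.Str.len text))
    = (pvOcc text).foldl (pvKeyStep (fun p => p.2)) (("", PySem.Str.len text), ("", PySem.Str.len text)) := by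
  unfold pvOcc
  rw [List.foldl_filterMap]
  have hf : (fun (s : (String × Int) × (String × Int)) day =>
      if PySem.Str.isIn day text then
        if PySem.Str.find text day < s.2.2 then
          if PySem.Str.find text day < s.1.2 then ((day, PySem.Str.find text day), s.1)
          else (s.1, (day, PySem.Str.find text day))
        else s
      else s)
      = (fun (s : (String × Int) × (String × Int)) day =>
        match pvG text day with
        | some x => pvKeyStep (fun p => p.2) s x
        | none => s) := by
    funext s day
    simp only [pvG, pvKeyStep, PySem.Str.isIn_eq, PySem.Str.find_eq]
    by_cases h : PySem.Chars.isIn day.toList text.toList = true <;> simp [h]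
  rw [hf]
  congr 1
  funext s day
  cases pvG text day <;> rfl

-- the weekday index as B computes it, from the name
def pvIdx (day : String) : Int := ((pvDays.idxOf day : Nat) : Int)

def pvF (p : String × Int) : Int × Int := (p.2, pvIdx p.1)

-- B's filtered enumeration is the image of A's occurrence list
lemma pvEnum_filterMap (c : String → Bool) (g : String → Int) (idxf : String → Int)
    (l : List String) :
    ∀ (s : Int), (∀ p ∈ PySem.List.enumerate l s, idxf p.2 = p.1) →
    (PySem.List.enumerate l s).filterMap (fun p =>
      if c p.2 then some (g p.2, p.1) else none)
    = (l.filterMap (fun d => if c d then some (d, g d) else none)).map (fun q => (g q.1, idxf q.1)) := by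
  induction l with
  | nil => intro s _; simp [PySem.List.enumerate]
  | cons d t ih =>
    intro s h
    rw [PySem.List.enumerate_cons] at h ⊢
    have hd : idxf d = s := h (s, d) (by simp)
    by_cases hc : c d = true
    · simp only [List.filterMap_cons, hc, if_pos]
      rw [ih (s + 1) (fun p hp => h p (by simp [hp]))]
      simp [hd]
    · simp only [List.filterMap_cons, hc]
      simp only [Bool.false_eq_true, if_false]
      exact ih (s + 1) (fun p hp => h p (by simp [hp]))

lemma pvB_occ (text : String) :
    (PySem.List.enumerate pvDays).filterMap (fun p =>
      if PySem.Str.isIn p.2 text then some (PySem.Str.find text p.2, p.1) else none)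
    = (pvOcc text).map pvF := by
  have h := pvEnum_filterMap (fun d => PySem.Str.isIn d text) (fun d => PySem.Str.find text d)
    pvIdx pvDays 0 (by decide)
  rw [h]
  unfold pvOcc
  rw [List.map_filterMap, List.map_filterMap]
  apply List.filterMap_congr
  intro d _
  unfold pvG pvF
  by_cases hc : PySem.Str.isIn d text = true <;> simp

lemma pvIns_map (x : String × Int) (s : List (String × Int)) :
    pvIns (fun q : Int × Int => q.1) (pvF x) (s.map pvF) = (pvIns (fun p : String × Int => p.2) x s).map pvF := by
  induction s with
  | nil => simp [pvIns_nil]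
  | cons a t ih =>
    rw [List.map_cons, pvIns_cons, pvIns_cons]
    by_cases h : x.2 < a.2
    · rw [if_pos (by simpa [pvF] using h), if_pos h]
      simp
    · rw [if_neg (by simpa [pvF] using h), if_neg h, List.map_cons, ih]

lemma pvSorted_map (l : List (String × Int)) :
    PySem.List.sorted (l.map pvF) (fun q => q.1)
    = (PySem.List.sorted l (fun p => p.2)).map pvF := by
  rw [PySem.List.sorted_eq_foldl_insertBy, PySem.List.sorted_eq_foldl_insertBy]
  have key : ∀ (acc : List (String × Int)),
      (l.map pvF).foldl (fun acc x => PySem.List.insertBy (fun a b => decide (a.1 < b.1)) x acc) (acc.map pvF)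
      = (l.foldl (fun acc x => PySem.List.insertBy (fun a b => decide (a.2 < b.2)) x acc) acc).map pvF := by
    induction l with
    | nil => intro acc; simp
    | cons x t ih =>
      intro acc
      simp only [List.map_cons, List.foldl_cons]
      have h := pvIns_map x acc
      simp only [pvIns] at h
      rw [h, ih]
  simpa using key []

lemma pvDay_index_eq (day : String) (h : day ∈ pvDays) : day_index day = some (pvIdx day) := by
  fin_cases h <;> decide

lemma pvDay_ne_empty (day : String) (h : day ∈ pvDays) : day ≠ "" := by
  fin_cases h <;> decide

-- ===== VERDICT (by name: the statement is the Claim_ definition above) =====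
theorem event_day_spec : Claim_equal_event_day := by
  intro text _
  unfold Spec_event_day event_day event_day_alt
  dsimp only
  rw [show (["Sunday", "Monday", "Tuesday", "Wednesday", "Thursday", "Friday", "Saturday"] : List String) = pvDays from rfl]
  rw [pvA_fold text, pvB_occ text, pvSorted_map]
  have hpad := pvFold_pad2 (fun p : String × Int => p.2) ("", PySem.Str.len text) (pvOcc text) []
    (by simp) (fun x hx => pvOcc_lt_len text x hx)
  simp only [pvPad2, pvIns] at hpad
  rw [hpad, ← PySem.List.sorted_eq_foldl_insertBy]
  have hmem : ∀ p ∈ PySem.List.sorted (pvOcc text) (fun p : String × Int => p.2), p.1 ∈ pvDays := by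
    intro p hp
    exact (pvOcc_mem text p ((PySem.List.mem_sorted _ _ _ _).mp hp)).1
  match hS : PySem.List.sorted (pvOcc text) (fun p : String × Int => p.2) with
  | [] => simp [day_index, pvDays]
  | [p] =>
    have hp : p.1 ∈ pvDays := hmem p (by rw [hS]; simp)
    simp [pvDay_index_eq p.1 hp, pvF]
  | p :: q :: t =>
    have hq : q.1 ∈ pvDays := hmem q (by rw [hS]; simp)
    simp [pvDay_ne_empty q.1 hq, pvDay_index_eq q.1 hq, pvF]
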